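-- pv_equiv track=rewrite | github.com/mink7878/coding | day4.py | solution
-- ===== SOURCE A (Python) =====
-- from collections import deque
--
-- def solution(land):
--     n = len(land) # 세로
--     m = len(land[0]) # 가로
--
--     # 동남서북
--     dx = [0, 1, 0, -1]
--     dy = [1, 0, -1, 0]
--
--     visited = [[False]*m for _ in range(n)]
--     checked = [0 for _ in range(m)]
--
--     def BFS(i, j):
--         q = deque()
--         q.append((i, j))
--         visited[i][j] = True
--
--         min_y, max_y = j, j
--         cnt = 0
--
--         while q: # 빈 큐 될때까지
--             now = q.popleft()
--             min_y = min(min_y, now[1])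
--             max_y = max(max_y, now[1])
--             cnt += 1
--
--             for k in range(4): # 상하좌우 확인
--                 cx = now[0] + dx[k]
--                 cy = now[1] + dy[k]
--                 if 0 <= cx < n and 0 <= cy < m: # 좌표유효성 확인
--                     if not visited[cx][cy] and land[cx][cy]: # 방문여부 & 까만색 확인
--                         visited[cx][cy] = True
--                         q.append((cx, cy))
--
--         for c in range(min_y, max_y+1):
--             checked[c] += cnt
--
--
--     for i in range(n):
--         for j in range(m):
--             if not visited[i][j] and land[i][j]: # 방문여부 & 까만색 확인
--                 BFS(i, j)
--
--     return max(checked)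
-- ===== SOURCE B (Python) =====
-- def solution(land):
--     n = len(land)
--     m = len(land[0])
--
--     visited = set()
--     comps = []  # (size, min column, max column) per connected component
--
--     for i in range(n):
--         for j in range(m):
--             if (i, j) not in visited and land[i][j]:
--                 # grow the component by set saturation; n*m rounds always suffice,
--                 # never re-entering already assigned cells
--                 S = {(i, j)}
--                 for _ in range(n * m):
--                     T = S | {(x + dx, y + dy)
--                              for (x, y) in S
--                              for (dx, dy) in ((0, 1), (1, 0), (0, -1), (-1, 0))
--                              if 0 <= x + dx < n and 0 <= y + dy < m
--                              and (x + dx, y + dy) not in visited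
--                              and land[x + dx][y + dy]}
--                     if T == S:
--                         break
--                     S = T
--                 visited |= S
--                 ys = [y for (_, y) in S]
--                 comps.append((len(S), min(ys), max(ys)))
--
--     return max(sum(s for (s, a, b) in comps if a <= c <= b) for c in range(m))
-- ===== Notes on version B (the rewrite author's own statement) =====
-- stated objective: alternative
-- what changed: Replaces the mutable-state BFS (deque worklist, in-place visited matrix, in-place per-interval updates of checked) by a pure set-saturation flood fill that grows each component as a set until it stops changing, records one (size, min-col, max-col) triple per component, and computes the answer as a max over per-column sums of those triples.
import Mathlib
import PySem

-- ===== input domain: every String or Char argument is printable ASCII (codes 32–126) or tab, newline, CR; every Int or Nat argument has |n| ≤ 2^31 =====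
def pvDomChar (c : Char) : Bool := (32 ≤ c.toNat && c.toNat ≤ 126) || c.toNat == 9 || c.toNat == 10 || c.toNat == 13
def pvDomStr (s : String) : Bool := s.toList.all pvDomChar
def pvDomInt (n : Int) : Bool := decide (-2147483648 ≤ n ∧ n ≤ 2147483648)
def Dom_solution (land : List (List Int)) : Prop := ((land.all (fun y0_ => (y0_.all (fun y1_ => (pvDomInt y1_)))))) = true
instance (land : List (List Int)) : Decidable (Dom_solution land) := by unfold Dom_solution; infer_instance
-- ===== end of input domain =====

-- B replaces A's mutable BFS (deque + visited matrix + in-place interval updates of checked)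
-- by a pure set-saturation flood fill per component and a max over per-column sums (alternative, not faster).

-- ===== PORT A =====
def pvDx : List Int := [0, 1, 0, -1]
def pvDy : List Int := [1, 0, -1, 0]

-- body of `for k in range(4)` inside BFS: state is (queue-after-popleft, visited)
def pvBfsDir (land : List (List Int)) (n m : Int) (now : Int × Int)
    (st : List (Int × Int) × List (List Bool)) (k : Int) :
    List (Int × Int) × List (List Bool) :=
  let cx := now.1 + PySem.List.pyGetD pvDx k 0
  let cy := now.2 + PySem.List.pyGetD pvDy k 0
  if 0 ≤ cx ∧ cx < n ∧ 0 ≤ cy ∧ cy < m then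
    if PySem.List.pyGetD (PySem.List.pyGetD st.2 cx []) cy false = false ∧
       PySem.List.pyGetD (PySem.List.pyGetD land cx []) cy 0 ≠ 0 then
      (st.1 ++ [(cx, cy)],
       PySem.List.pySetD st.2 cx (PySem.List.pySetD (PySem.List.pyGetD st.2 cx []) cy true))
    else st
  else st

-- the `while q:` loop; fuel only makes the recursion total (proved sufficient below)
def pvBfsLoop (land : List (List Int)) (n m : Int) :
    Nat → List (Int × Int) → List (List Bool) → Int → Int → Int →
    List (List Bool) × Int × Int × Int
  | 0, _, vis, miny, maxy, cnt => (vis, miny, maxy, cnt)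
  | _ + 1, [], vis, miny, maxy, cnt => (vis, miny, maxy, cnt)
  | fuel + 1, now :: rest, vis, miny, maxy, cnt =>
    let miny' := min miny now.2
    let maxy' := max maxy now.2
    let st := (PySem.List.pyRange 0 4 1).foldl (pvBfsDir land n m now) (rest, vis)
    pvBfsLoop land n m fuel st.1 st.2 miny' maxy' (cnt + 1)

def solution (land : List (List Int)) : Int :=
  let n : Int := land.length
  let m : Int := (PySem.List.pyGetD land 0 []).length   -- len(land[0]); IndexError on [] is excluded by Pre_
  let visited0 : List (List Bool) := List.replicate n.toNat (List.replicate m.toNat false)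
  let checked0 : List Int := List.replicate m.toNat 0
  let fin :=
    (PySem.List.pyRange 0 n 1).foldl (fun st i =>
      (PySem.List.pyRange 0 m 1).foldl (fun st j =>
        if PySem.List.pyGetD (PySem.List.pyGetD st.1 i []) j false = false ∧
           PySem.List.pyGetD (PySem.List.pyGetD land i []) j 0 ≠ 0 then
          -- BFS(i, j): mark seed visited, run the queue loop, then add cnt on checked[min_y..max_y]
          let vis1 := PySem.List.pySetD st.1 i (PySem.List.pySetD (PySem.List.pyGetD st.1 i []) j true)
          let r := pvBfsLoop land n m (5 * (n.toNat * m.toNat) + 1) [(i, j)] vis1 j j 0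
          let checked' := (PySem.List.pyRange r.2.1 (r.2.2.1 + 1) 1).foldl
            (fun ch c => PySem.List.pySetD ch c (PySem.List.pyGetD ch c 0 + r.2.2.2)) st.2
          (r.1, checked')
        else st) st)
      (visited0, checked0)
  (PySem.List.max? fin.2 (fun x => x)).getD 0   -- max(checked); m > 0 by Pre_

-- ===== PORT B =====
def pvDirs : List (Int × Int) := [(0, 1), (1, 0), (0, -1), (-1, 0)]

-- one saturation round: S | {in-bounds black unassigned neighbours of S}
def pvGrow (land : List (List Int)) (n m : Int) (visited : PySem.Set (Int × Int))
    (S : PySem.Set (Int × Int)) : PySem.Set (Int × Int) :=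
  PySem.Set.union S
    (S.foldl (fun acc p =>
      pvDirs.foldl (fun acc d =>
        let c := (p.1 + d.1, p.2 + d.2)
        if 0 ≤ c.1 ∧ c.1 < n ∧ 0 ≤ c.2 ∧ c.2 < m ∧ ¬ (c ∈ visited) ∧
           PySem.List.pyGetD (PySem.List.pyGetD land c.1 []) c.2 0 ≠ 0 then
          PySem.Set.add acc c
        else acc) acc) PySem.Set.empty)

def solution_alt (land : List (List Int)) : Int :=
  let n : Int := land.length
  let m : Int := (PySem.List.pyGetD land 0 []).length
  let fin :=
    (PySem.List.pyRange 0 n 1).foldl (fun st i =>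
      (PySem.List.pyRange 0 m 1).foldl (fun st j =>
        if ¬ ((i, j) ∈ st.1) ∧ PySem.List.pyGetD (PySem.List.pyGetD land i []) j 0 ≠ 0 then
          -- saturation loop with the `break` once T == S (flag = loop broken)
          let S := ((List.range (n.toNat * m.toNat)).foldl
            (fun p _ =>
              if p.2 then p
              else
                let T := pvGrow land n m st.1 p.1
                if PySem.Set.equal T p.1 then (p.1, true) else (T, false))
            (PySem.Set.ofList [(i, j)], false)).1
          let ys := S.map (fun p => p.2)
          (PySem.Set.update st.1 S,
           st.2 ++ [((S.length : Int),
                     (PySem.List.min? ys (fun y => y)).getD 0,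
                     (PySem.List.max? ys (fun y => y)).getD 0)])
        else st) st)
      ((PySem.Set.empty : PySem.Set (Int × Int)), ([] : List (Int × Int × Int)))
  (PySem.List.max? ((PySem.List.pyRange 0 m 1).map (fun c =>
      fin.2.foldl (fun acc t => if t.2.1 ≤ c ∧ c ≤ t.2.2 then acc + t.1 else acc) 0))
    (fun x => x)).getD 0

-- ===== PRECONDITION & SPEC =====
-- Pre_ excludes exactly the inputs where A raises: empty land / empty first row (IndexError on land[0]
-- or ValueError on max([])), and ragged grids with a row shorter than the first (IndexError in the scan).
def Pre_solution (land : List (List Int)) : Prop :=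
  land ≠ [] ∧ 0 < (PySem.List.pyGetD land 0 []).length ∧
    ∀ row ∈ land, (PySem.List.pyGetD land 0 []).length ≤ row.length
instance (land : List (List Int)) : Decidable (Pre_solution land) := by
  unfold Pre_solution; infer_instance
def pvWitness_solution : List (List Int) := [[1, 0], [0, 1]]

def Spec_solution (land : List (List Int)) (out : Int) : Prop := out = solution_alt land
instance (land : List (List Int)) (out : Int) : Decidable (Spec_solution land out) := by
  unfold Spec_solution; infer_instance

-- ===== CLAIM (what is proved, stated in full; the proofs are below) =====
def Claim_equal_solution : Prop :=
  ∀ (land : List (List Int)), Dom_solution land → Pre_solution land →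
    Spec_solution land (solution land)

-- ===== LEMMAS AND PROOFS =====

-- ---------- abstract vocabulary (proof-side only) ----------
def pvInb (n m : Int) (c : Int × Int) : Prop := 0 ≤ c.1 ∧ c.1 < n ∧ 0 ≤ c.2 ∧ c.2 < m

def pvVal (land : List (List Int)) (c : Int × Int) : Int :=
  PySem.List.pyGetD (PySem.List.pyGetD land c.1 []) c.2 0

def pvBlack (land : List (List Int)) (n m : Int) (c : Int × Int) : Prop :=
  pvInb n m c ∧ pvVal land c ≠ 0

def pvNbrs (c : Int × Int) : List (Int × Int) :=
  [(c.1 + 0, c.2 + 1), (c.1 + 1, c.2 + 0), (c.1 + 0, c.2 + -1), (c.1 + -1, c.2 + 0)]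

inductive pvReach (land : List (List Int)) (n m : Int) (V : List (Int × Int)) (s : Int × Int) :
    (Int × Int) → Prop
  | refl : pvReach land n m V s s
  | step {c d : Int × Int} : pvReach land n m V s c → d ∈ pvNbrs c → pvBlack land n m d →
      d ∉ V → pvReach land n m V s d

theorem pvReach_black {land : List (List Int)} {n m : Int} {V : List (Int × Int)}
    {s c : Int × Int} (hs : pvBlack land n m s) (h : pvReach land n m V s c) :
    pvBlack land n m c := by
  induction h with
  | refl => exact hs
  | step _ _ hb _ _ => exact hb

-- ---------- visited matrix ----------
def pvMget (vis : List (List Bool)) (c : Int × Int) : Bool :=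
  PySem.List.pyGetD (PySem.List.pyGetD vis c.1 []) c.2 false

def pvMset (vis : List (List Bool)) (c : Int × Int) : List (List Bool) :=
  PySem.List.pySetD vis c.1 (PySem.List.pySetD (PySem.List.pyGetD vis c.1 []) c.2 true)

def pvShape (n m : Int) (vis : List (List Bool)) : Prop :=
  vis.length = n.toNat ∧ ∀ row ∈ vis, row.length = m.toNat

theorem pvShape_mset {n m : Int} {vis : List (List Bool)} (h : pvShape n m vis)
    {c : Int × Int} (hc : pvInb n m c) : pvShape n m (pvMset vis c) := by
  obtain ⟨h1, h2⟩ := h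
  obtain ⟨hx0, hxn, hy0, hym⟩ := hc
  constructor
  · simpa [pvMset, PySem.List.length_pySetD] using h1
  · intro row hrow
    simp only [pvMset, PySem.List.pySetD_of_nonneg _ _ hx0] at hrow
    rcases List.mem_or_eq_of_mem_set hrow with h | h
    · exact h2 _ h
    · subst h
      rw [PySem.List.length_pySetD, PySem.List.pyGetD_of_nonneg _ _ hx0]
      have hlt : c.1.toNat < vis.length := by omega
      rw [List.getD_eq_getElem _ _ hlt]
      exact h2 _ (List.getElem_mem hlt)

theorem pvMget_eq {vis : List (List Bool)} {c : Int × Int} (hx : 0 ≤ c.1) (hy : 0 ≤ c.2) :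
    pvMget vis c = ((vis[c.1.toNat]?.getD [])[c.2.toNat]?).getD false := by
  simp [pvMget, PySem.List.pyGetD_of_nonneg _ _ hx, PySem.List.pyGetD_of_nonneg _ _ hy,
    List.getD_eq_getElem?_getD]

theorem pvMget_mset {n m : Int} {vis : List (List Bool)} (h : pvShape n m vis)
    {c : Int × Int} (hc : pvInb n m c) {c' : Int × Int} (hx0' : 0 ≤ c'.1) (hy0' : 0 ≤ c'.2) :
    pvMget (pvMset vis c) c' = if c' = c then true else pvMget vis c' := by
  obtain ⟨hx0, hxn, hy0, hym⟩ := hc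
  have hL : vis.length = n.toNat := h.1
  have hlt : c.1.toNat < vis.length := by omega
  have hrowlen : (vis[c.1.toNat]?.getD []).length = m.toNat := by
    rw [List.getElem?_eq_getElem hlt]
    exact h.2 _ (List.getElem_mem hlt)
  have hmset : pvMset vis c = vis.set c.1.toNat ((vis[c.1.toNat]?.getD []).set c.2.toNat true) := by
    simp [pvMset, PySem.List.pySetD_of_nonneg _ _ hx0, PySem.List.pySetD_of_nonneg _ _ hy0,
      PySem.List.pyGetD_of_nonneg _ _ hx0, List.getD_eq_getElem?_getD]
  rw [hmset, pvMget_eq hx0' hy0', pvMget_eq hx0' hy0']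
  by_cases hxx : c'.1.toNat = c.1.toNat
  · rw [hxx, List.getElem?_set_self (by simpa using hlt), Option.getD_some]
    by_cases hyy : c'.2.toNat = c.2.toNat
    · have hceq : c' = c := by
        have e1 : c'.1 = c.1 := by omega
        have e2 : c'.2 = c.2 := by omega
        exact Prod.ext e1 e2
      rw [if_pos hceq, hyy]
      rw [List.getElem?_set_self (by omega), Option.getD_some]
    · have hcne : c' ≠ c := fun hh => hyy (by rw [hh])
      rw [if_neg hcne, List.getElem?_set_ne (Ne.symm hyy)]
  · have hcne : c' ≠ c := fun hh => hxx (by rw [hh])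
    rw [if_neg hcne, List.getElem?_set_ne (Ne.symm hxx)]

theorem pvMget_mset_self {n m : Int} {vis : List (List Bool)} (h : pvShape n m vis)
    {c : Int × Int} (hc : pvInb n m c) : pvMget (pvMset vis c) c = true := by
  rw [pvMget_mset h hc hc.1 hc.2.2.1, if_pos rfl]

theorem pvMget_mset_mono {n m : Int} {vis : List (List Bool)} (h : pvShape n m vis)
    {c d : Int × Int} (hc : pvInb n m c) (hd : pvInb n m d)
    (hget : pvMget vis c = true) : pvMget (pvMset vis d) c = true := by
  rw [pvMget_mset h hd hc.1 hc.2.2.1]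
  split
  · rfl
  · exact hget

theorem pvMget_mset_false {n m : Int} {vis : List (List Bool)} (h : pvShape n m vis)
    {c d : Int × Int} (hc : 0 ≤ c.1 ∧ 0 ≤ c.2) (hd : pvInb n m d)
    (hget : pvMget (pvMset vis d) c = false) : pvMget vis c = false := by
  rw [pvMget_mset h hd hc.1 hc.2] at hget
  rcases eq_or_ne c d with rfl | hne
  · simp at hget
  · rwa [if_neg hne] at hget

-- ---------- counting unvisited cells (termination measure) ----------
theorem pvCountP_lt {alpha : Type} (L : List alpha) (p p' : alpha → Bool)
    (hm : ∀ a ∈ L, p' a = true → p a = true) (a0 : alpha) (ha : a0 ∈ L)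
    (hp : p a0 = true) (hp' : p' a0 = false) : L.countP p' < L.countP p := by
  induction L with
  | nil => cases ha
  | cons b t ih =>
    rw [List.countP_cons, List.countP_cons]
    rcases List.mem_cons.mp ha with rfl | hmem
    · have hle : t.countP p' ≤ t.countP p :=
        List.countP_mono_left (fun x hx => hm x (List.mem_cons_of_mem _ hx))
      have e1 : (if p' a0 = true then 1 else 0) = 0 := by simp [hp']
      have e2 : (if p a0 = true then 1 else 0) = 1 := by simp [hp]
      omega
    · have hlt := ih (fun a hx => hm a (List.mem_cons_of_mem _ hx)) hmem
      have hb : (if p' b = true then 1 else 0) ≤ (if p b = true then 1 else 0) := by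
        by_cases hpb : p' b = true
        · simp [hpb, hm b (List.mem_cons_self) hpb]
        · simp [hpb]
      omega

def pvAll (n m : Int) : List (Int × Int) :=
  (PySem.List.pyRange 0 n 1).flatMap (fun x => (PySem.List.pyRange 0 m 1).map (fun y => (x, y)))

theorem mem_pvAll {n m : Int} {c : Int × Int} : c ∈ pvAll n m ↔ pvInb n m c := by
  constructor
  · intro h
    simp only [pvAll, List.mem_flatMap, List.mem_map] at h
    obtain ⟨x, hx, y, hy, rfl⟩ := h
    rw [PySem.List.mem_pyRange_one] at hx hy
    exact ⟨hx.1, hx.2, hy.1, hy.2⟩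
  · intro h
    simp only [pvAll, List.mem_flatMap, List.mem_map]
    exact ⟨c.1, PySem.List.mem_pyRange_one.mpr ⟨h.1, h.2.1⟩,
      c.2, PySem.List.mem_pyRange_one.mpr ⟨h.2.2.1, h.2.2.2⟩, rfl⟩

theorem length_pvAll (n m : Int) : (pvAll n m).length = n.toNat * m.toNat := by
  simp [pvAll, PySem.List.length_pyRange_one, List.map_const']

def pvUnvis (n m : Int) (vis : List (List Bool)) : Nat :=
  (pvAll n m).countP (fun c => !pvMget vis c)

theorem pvUnvis_lt {n m : Int} {vis : List (List Bool)} {c : Int × Int}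
    (hc : pvInb n m c) (hget : pvMget vis c = true) :
    pvUnvis n m vis < n.toNat * m.toNat := by
  have h2 := pvCountP_lt (pvAll n m) (fun _ => true) (fun c' => !pvMget vis c')
    (fun a _ _ => rfl) c (mem_pvAll.mpr hc) rfl (by simp [hget])
  simpa [pvUnvis, List.countP_true, length_pvAll] using h2

theorem pvUnvis_mset_lt {n m : Int} {vis : List (List Bool)} (h : pvShape n m vis)
    {c : Int × Int} (hc : pvInb n m c) (hget : pvMget vis c = false) :
    pvUnvis n m (pvMset vis c) < pvUnvis n m vis := by
  refine pvCountP_lt (pvAll n m) (fun c' => !pvMget vis c') (fun c' => !pvMget (pvMset vis c) c')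
    ?_ c (mem_pvAll.mpr hc) (by simp [hget]) (by simp [pvMget_mset_self h hc])
  intro a ha hfa
  have hinb := mem_pvAll.mp ha
  simp only [Bool.not_eq_eq_eq_not, Bool.not_true] at hfa ⊢
  exact pvMget_mset_false h ⟨hinb.1, hinb.2.2.1⟩ hc hfa

-- ---------- B side: saturation computes reachability ----------
theorem mem_addIf {P : Prop} [Decidable P] (acc : PySem.Set (Int × Int)) (x c : Int × Int) :
    (c ∈ (if P then PySem.Set.add acc x else acc)) ↔ c ∈ acc ∨ (P ∧ c = x) := by
  split_ifs with hP
  · rw [PySem.Set.mem_add]; tauto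
  · tauto

theorem mem_dirsFold (land : List (List Int)) (n m : Int) (V : List (Int × Int))
    (p : Int × Int) (acc : PySem.Set (Int × Int)) (c : Int × Int) :
    (c ∈ pvDirs.foldl (fun acc d =>
      let c' := (p.1 + d.1, p.2 + d.2)
      if 0 ≤ c'.1 ∧ c'.1 < n ∧ 0 ≤ c'.2 ∧ c'.2 < m ∧ ¬ c' ∈ V ∧
         PySem.List.pyGetD (PySem.List.pyGetD land c'.1 []) c'.2 0 ≠ 0 then
        PySem.Set.add acc c' else acc) acc)
    ↔ c ∈ acc ∨ (c ∈ pvNbrs p ∧ pvBlack land n m c ∧ c ∉ V) := by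
  simp only [pvDirs, List.foldl, mem_addIf]
  simp only [pvNbrs, pvBlack, pvInb, pvVal, List.mem_cons, List.not_mem_nil, or_false]
  constructor
  · rintro ((((h | ⟨hc, rfl⟩) | ⟨hc, rfl⟩) | ⟨hc, rfl⟩) | ⟨hc, rfl⟩)
    · exact Or.inl h
    all_goals refine Or.inr ⟨by tauto, ⟨⟨hc.1, hc.2.1, hc.2.2.1, hc.2.2.2.1⟩, hc.2.2.2.2.2⟩, hc.2.2.2.2.1⟩
  · rintro (h | ⟨hmem, ⟨hinb, hval⟩, hv⟩)
    · exact Or.inl (Or.inl (Or.inl (Or.inl h)))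
    rcases hmem with rfl | rfl | rfl | rfl
    · exact Or.inl (Or.inl (Or.inl (Or.inr ⟨⟨hinb.1, hinb.2.1, hinb.2.2.1, hinb.2.2.2, hv, hval⟩, rfl⟩)))
    · exact Or.inl (Or.inl (Or.inr ⟨⟨hinb.1, hinb.2.1, hinb.2.2.1, hinb.2.2.2, hv, hval⟩, rfl⟩))
    · exact Or.inl (Or.inr ⟨⟨hinb.1, hinb.2.1, hinb.2.2.1, hinb.2.2.2, hv, hval⟩, rfl⟩)
    · exact Or.inr ⟨⟨hinb.1, hinb.2.1, hinb.2.2.1, hinb.2.2.2, hv, hval⟩, rfl⟩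

theorem mem_pvGrow {land : List (List Int)} {n m : Int} {V : List (Int × Int)}
    {S : PySem.Set (Int × Int)} {c : Int × Int} :
    c ∈ pvGrow land n m V S ↔
      c ∈ S ∨ ∃ p ∈ S, c ∈ pvNbrs p ∧ pvBlack land n m c ∧ c ∉ V := by
  unfold pvGrow
  rw [PySem.Set.mem_union]
  have main : ∀ (L : List (Int × Int)) (acc : PySem.Set (Int × Int)),
      (c ∈ L.foldl (fun acc p => pvDirs.foldl (fun acc d =>
        let c' := (p.1 + d.1, p.2 + d.2)
        if 0 ≤ c'.1 ∧ c'.1 < n ∧ 0 ≤ c'.2 ∧ c'.2 < m ∧ ¬ c' ∈ V ∧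
           PySem.List.pyGetD (PySem.List.pyGetD land c'.1 []) c'.2 0 ≠ 0 then
          PySem.Set.add acc c' else acc) acc) acc)
      ↔ c ∈ acc ∨ ∃ p ∈ L, c ∈ pvNbrs p ∧ pvBlack land n m c ∧ c ∉ V := by
    intro L
    induction L with
    | nil => intro acc; simp
    | cons p t ih =>
      intro acc
      rw [List.foldl_cons, ih, mem_dirsFold]
      simp only [List.mem_cons]
      constructor
      · rintro ((h | h) | ⟨q, hq, h⟩)
        · exact Or.inl h
        · exact Or.inr ⟨p, Or.inl rfl, h⟩
        · exact Or.inr ⟨q, Or.inr hq, h⟩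
      · rintro (h | ⟨q, rfl | hq, h⟩)
        · exact Or.inl (Or.inl h)
        · exact Or.inl (Or.inr h)
        · exact Or.inr ⟨q, hq, h⟩
  rw [main]
  simp [PySem.Set.empty]

theorem nodup_pvGrow {land : List (List Int)} {n m : Int} {V : List (Int × Int)}
    {S : PySem.Set (Int × Int)} (h : S.Nodup) : (pvGrow land n m V S).Nodup :=
  PySem.Set.nodup_union _ _ h

theorem pvGrow_append {land : List (List Int)} {n m : Int} {V : List (Int × Int)}
    (S : PySem.Set (Int × Int)) : ∃ extra, pvGrow land n m V S = S ++ extra := by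
  exact ⟨_, PySem.Set.update_eq_append_filter _ _⟩

def pvSat (land : List (List Int)) (n m : Int) (V : PySem.Set (Int × Int)) (s : Int × Int)
    (k : Nat) : PySem.Set (Int × Int) :=
  (List.range k).foldl (fun S _ => pvGrow land n m V S) (PySem.Set.ofList [s])

theorem pvSat_zero (land : List (List Int)) (n m : Int) (V : PySem.Set (Int × Int))
    (s : Int × Int) : pvSat land n m V s 0 = [s] := rfl

theorem pvSat_succ (land : List (List Int)) (n m : Int) (V : PySem.Set (Int × Int))
    (s : Int × Int) (k : Nat) :
    pvSat land n m V s (k + 1) = pvGrow land n m V (pvSat land n m V s k) := by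
  simp [pvSat, List.range_succ]

theorem nodup_pvSat (land : List (List Int)) (n m : Int) (V : PySem.Set (Int × Int))
    (s : Int × Int) (k : Nat) : (pvSat land n m V s k).Nodup := by
  induction k with
  | zero => rw [pvSat_zero]; simp
  | succ k ih => rw [pvSat_succ]; exact nodup_pvGrow ih

theorem pvSat_sound (land : List (List Int)) (n m : Int) (V : PySem.Set (Int × Int))
    (s : Int × Int) (k : Nat) :
    ∀ c ∈ pvSat land n m V s k, pvReach land n m V s c := by
  induction k with
  | zero =>
    rw [pvSat_zero]
    intro c hc
    rcases List.mem_singleton.mp hc with rfl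
    exact pvReach.refl
  | succ k ih =>
    intro c hc
    rw [pvSat_succ, mem_pvGrow] at hc
    rcases hc with hc | ⟨p, hp, hn, hb, hv⟩
    · exact ih c hc
    · exact pvReach.step (ih p hp) hn hb hv

theorem pvSat_le_mem (land : List (List Int)) (n m : Int) (V : PySem.Set (Int × Int))
    (s : Int × Int) {j k : Nat} (h : j ≤ k) {c : Int × Int}
    (hc : c ∈ pvSat land n m V s j) : c ∈ pvSat land n m V s k := by
  induction k with
  | zero => rwa [Nat.le_zero.mp h] at hc
  | succ k ih =>
    rcases Nat.lt_or_ge j (k + 1) with hlt | hge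
    · rw [pvSat_succ, mem_pvGrow]
      exact Or.inl (ih (by omega))
    · rwa [Nat.le_antisymm h hge] at hc

theorem pvSat_stable (land : List (List Int)) (n m : Int) (V : PySem.Set (Int × Int))
    (s : Int × Int) {k : Nat}
    (hfix : pvGrow land n m V (pvSat land n m V s k) = pvSat land n m V s k) (j : Nat) :
    pvSat land n m V s (k + j) = pvSat land n m V s k := by
  induction j with
  | zero => rfl
  | succ j ih => rw [← Nat.add_assoc, pvSat_succ, ih, hfix]

theorem pvSat_length_lb (land : List (List Int)) (n m : Int) (V : PySem.Set (Int × Int))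
    (s : Int × Int) (k : Nat)
    (h : ∀ j < k, pvGrow land n m V (pvSat land n m V s j) ≠ pvSat land n m V s j) :
    k + 1 ≤ (pvSat land n m V s k).length := by
  induction k with
  | zero => rw [pvSat_zero]; simp
  | succ k ih =>
    have hk := ih (fun j hj => h j (by omega))
    obtain ⟨extra, hex⟩ := pvGrow_append (land := land) (n := n) (m := m) (V := V)
      (pvSat land n m V s k)
    have hne := h k (by omega)
    rcases extra with _ | ⟨e, es⟩
    · exact absurd (by simpa using hex) hne
    · rw [pvSat_succ, hex]
      simp only [List.length_append, List.length_cons]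
      omega

theorem pvSat_length_le (land : List (List Int)) (n m : Int) (V : PySem.Set (Int × Int))
    {s : Int × Int} (hs : pvBlack land n m s) (k : Nat) :
    (pvSat land n m V s k).length ≤ n.toNat * m.toNat := by
  rw [← length_pvAll n m]
  refine List.Subperm.length_le (List.subperm_of_subset (nodup_pvSat land n m V s k) ?_)
  intro c hc
  exact mem_pvAll.mpr (pvReach_black hs (pvSat_sound land n m V s k c hc)).1

-- the final saturation set is exactly the set of reachable cells
theorem mem_pvSat_final (land : List (List Int)) (n m : Int) (V : PySem.Set (Int × Int))
    {s : Int × Int} (hs : pvBlack land n m s) (c : Int × Int) :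
    c ∈ pvSat land n m V s (n.toNat * m.toNat) ↔ pvReach land n m V s c := by
  set K := n.toNat * m.toNat with hK
  constructor
  · exact pvSat_sound land n m V s K c
  · intro hr
    by_cases hfix : ∃ j < K, pvGrow land n m V (pvSat land n m V s j) = pvSat land n m V s j
    · obtain ⟨j, hjK, hj⟩ := hfix
      have hKj : pvSat land n m V s K = pvSat land n m V s j := by
        have := pvSat_stable land n m V s hj (K - j)
        rwa [Nat.add_sub_cancel' (by omega)] at this
      have hclosed : pvGrow land n m V (pvSat land n m V s K) = pvSat land n m V s K := by
        rw [hKj]; exact hj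
      induction hr with
      | refl =>
        exact pvSat_le_mem land n m V s (Nat.zero_le K) (by rw [pvSat_zero]; simp)
      | step hrc hn hb hv ih =>
        have hcmem := ih
        rw [← hclosed, mem_pvGrow]
        exact Or.inr ⟨_, hcmem, hn, hb, hv⟩
    · have hfix' : ∀ j < K, pvGrow land n m V (pvSat land n m V s j) ≠ pvSat land n m V s j := by
        intro j hj
        by_contra hh
        exact hfix ⟨j, hj, hh⟩
      have h1 := pvSat_length_lb land n m V s K hfix'
      have h2 := pvSat_length_le land n m V hs K
      omega

-- ---------- A side: the BFS worklist loop ----------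
def pvCellStep (land : List (List Int)) (n m : Int)
    (st : List (Int × Int) × List (List Bool)) (c : Int × Int) :
    List (Int × Int) × List (List Bool) :=
  if 0 ≤ c.1 ∧ c.1 < n ∧ 0 ≤ c.2 ∧ c.2 < m then
    if pvMget st.2 c = false ∧ pvVal land c ≠ 0 then
      (st.1 ++ [c], pvMset st.2 c)
    else st
  else st

theorem bfsDir_fold_eq (land : List (List Int)) (n m : Int) (now : Int × Int)
    (st : List (Int × Int) × List (List Bool)) :
    (PySem.List.pyRange 0 4 1).foldl (pvBfsDir land n m now) st
      = (pvNbrs now).foldl (pvCellStep land n m) st := rfl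

structure pvInv (land : List (List Int)) (n m : Int) (V : List (Int × Int)) (s : Int × Int)
    (pops q : List (Int × Int)) (vis : List (List Bool)) (miny maxy cnt : Int) : Prop where
  shape : pvShape n m vis
  mem : ∀ c, pvInb n m c → (pvMget vis c = true ↔ c ∈ V ∨ c ∈ pops ∨ c ∈ q)
  nd : (pops ++ q).Nodup
  sound : ∀ c ∈ pops ++ q, pvReach land n m V s c ∧ c ∉ V
  frontier : ∀ c ∈ pops, ∀ d ∈ pvNbrs c, pvBlack land n m d → d ∉ V → pvMget vis d = true
  seedmem : s ∈ pops ++ q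
  cnt_eq : cnt = (pops.length : Int)
  miny_eq : miny = (pops.map Prod.snd).foldl min s.2
  maxy_eq : maxy = (pops.map Prod.snd).foldl max s.2

-- mid-fold invariant while expanding the neighbours of `now`
def pvMid (land : List (List Int)) (n m : Int) (V : List (Int × Int)) (s : Int × Int)
    (pops rest : List (Int × Int)) (vis : List (List Bool))
    (done : List (Int × Int)) (st : List (Int × Int) × List (List Bool)) (now : Int × Int) :
    Prop :=
  pvShape n m st.2 ∧
  (∀ c, pvInb n m c → (pvMget st.2 c = true ↔ c ∈ V ∨ c ∈ (pops ++ [now]) ∨ c ∈ st.1)) ∧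
  ((pops ++ [now]) ++ st.1).Nodup ∧
  (∀ c ∈ (pops ++ [now]) ++ st.1, pvReach land n m V s c ∧ c ∉ V) ∧
  (∀ c, pvInb n m c → pvMget vis c = true → pvMget st.2 c = true) ∧
  s ∈ (pops ++ [now]) ++ st.1 ∧
  (∀ d ∈ done, pvBlack land n m d → d ∉ V → pvMget st.2 d = true) ∧
  5 * pvUnvis n m st.2 + st.1.length ≤ 5 * pvUnvis n m vis + rest.length

theorem pvMid_step (land : List (List Int)) (n m : Int) (V : List (Int × Int))
    (s now : Int × Int) (pops rest : List (Int × Int)) (vis : List (List Bool))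
    (hnowR : pvReach land n m V s now)
    (d : Int × Int) (hd : d ∈ pvNbrs now)
    (done : List (Int × Int)) (st : List (Int × Int) × List (List Bool))
    (h : pvMid land n m V s pops rest vis done st now) :
    pvMid land n m V s pops rest vis (done ++ [d]) (pvCellStep land n m st d) now := by
  obtain ⟨hsh, hmem, hnd, hsound, hmono, hseed, hdone, hmeas⟩ := h
  unfold pvCellStep
  by_cases hinb : 0 ≤ d.1 ∧ d.1 < n ∧ 0 ≤ d.2 ∧ d.2 < m
  · rw [if_pos hinb]
    by_cases hg : pvMget st.2 d = false ∧ pvVal land d ≠ 0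
    · rw [if_pos hg]
      have hdinb : pvInb n m d := hinb
      have hdblack : pvBlack land n m d := ⟨hdinb, hg.2⟩
      have hnotmem : ¬ (d ∈ V ∨ d ∈ (pops ++ [now]) ∨ d ∈ st.1) := by
        intro hcon
        have := (hmem d hdinb).mpr hcon
        rw [hg.1] at this
        exact Bool.false_ne_true this
      have hdV : d ∉ V := fun hh => hnotmem (Or.inl hh)
      have hdp : d ∉ pops ++ [now] := fun hh => hnotmem (Or.inr (Or.inl hh))
      have hdq : d ∉ st.1 := fun hh => hnotmem (Or.inr (Or.inr hh))
      have hdR : pvReach land n m V s d := pvReach.step hnowR hd hdblack hdV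
      refine ⟨pvShape_mset hsh hdinb, ?_, ?_, ?_, ?_, ?_, ?_, ?_⟩
      · intro c hc
        rw [pvMget_mset hsh hdinb hc.1 hc.2.2.1]
        rcases eq_or_ne c d with rfl | hne
        · simp
        · rw [if_neg hne, hmem c hc]
          simp only [List.mem_append, List.mem_singleton]
          constructor
          · intro hh; tauto
          · intro hh
            rcases hh with h1 | h1 | (h1 | h1)
            · tauto
            · tauto
            · tauto
            · exact absurd h1 hne
      · show ((pops ++ [now]) ++ (st.1 ++ [d])).Nodup
        rw [← List.append_assoc]
        refine List.Nodup.append hnd (List.nodup_singleton d) ?_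
        intro x hx hxd
        rw [List.mem_singleton] at hxd
        subst hxd
        rcases List.mem_append.mp hx with hx | hx
        · exact hdp hx
        · exact hdq hx
      · intro c hc
        simp only [List.mem_append, List.mem_singleton] at hc
        rcases hc with (hc | hc) | (hc | rfl)
        · exact hsound c (by simp only [List.mem_append, List.mem_singleton]; tauto)
        · exact hsound c (by simp only [List.mem_append, List.mem_singleton]; tauto)
        · exact hsound c (by simp only [List.mem_append, List.mem_singleton]; tauto)
        · exact ⟨hdR, hdV⟩
      · intro c hc hget
        exact pvMget_mset_mono hsh hc hdinb (hmono c hc hget)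
      · simp only [List.mem_append, List.mem_singleton] at hseed ⊢
        tauto
      · intro e he hbe hVe
        rcases List.mem_append.mp he with he | he
        · exact pvMget_mset_mono hsh hbe.1 hdinb (hdone e he hbe hVe)
        · rcases List.mem_singleton.mp he with rfl
          exact pvMget_mset_self hsh hdinb
      · have hlt := pvUnvis_mset_lt hsh hdinb hg.1
        show 5 * pvUnvis n m (pvMset st.2 d) + (st.1 ++ [d]).length ≤ _
        simp only [List.length_append, List.length_singleton]
        omega
    · rw [if_neg hg]
      refine ⟨hsh, hmem, hnd, hsound, hmono, hseed, ?_, hmeas⟩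
      intro e he hbe hVe
      rcases List.mem_append.mp he with he | he
      · exact hdone e he hbe hVe
      · rcases List.mem_singleton.mp he with rfl
        have : ¬ pvMget st.2 e = false := fun hf => hg ⟨hf, hbe.2⟩
        simpa using this
  · rw [if_neg hinb]
    refine ⟨hsh, hmem, hnd, hsound, hmono, hseed, ?_, hmeas⟩
    intro e he hbe hVe
    rcases List.mem_append.mp he with he | he
    · exact hdone e he hbe hVe
    · rcases List.mem_singleton.mp he with rfl
      exact absurd ⟨hbe.1.1, hbe.1.2.1, hbe.1.2.2.1, hbe.1.2.2.2⟩ hinb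

theorem pvMid_fold (land : List (List Int)) (n m : Int) (V : List (Int × Int))
    (s now : Int × Int) (pops rest : List (Int × Int)) (vis : List (List Bool))
    (hnowR : pvReach land n m V s now) :
    ∀ (L : List (Int × Int)), (∀ d ∈ L, d ∈ pvNbrs now) →
    ∀ (done : List (Int × Int)) (st : List (Int × Int) × List (List Bool)),
    pvMid land n m V s pops rest vis done st now →
    pvMid land n m V s pops rest vis (done ++ L) (L.foldl (pvCellStep land n m) st) now := by
  intro L
  induction L with
  | nil => intro _ done st h; simpa using h
  | cons d t ih =>
    intro hL done st h
    have h1 := pvMid_step land n m V s now pops rest vis hnowR d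
      (hL d List.mem_cons_self) done st h
    have h2 := ih (fun e he => hL e (List.mem_cons_of_mem _ he)) (done ++ [d])
      (pvCellStep land n m st d) h1
    rw [List.foldl_cons]
    simpa [List.append_assoc] using h2

theorem pvStep_inv (land : List (List Int)) (n m : Int) (V : List (Int × Int))
    (s now : Int × Int) (pops rest : List (Int × Int)) (vis : List (List Bool))
    (miny maxy cnt : Int)
    (hInv : pvInv land n m V s pops (now :: rest) vis miny maxy cnt) :
    pvInv land n m V s (pops ++ [now])
        ((pvNbrs now).foldl (pvCellStep land n m) (rest, vis)).1
        ((pvNbrs now).foldl (pvCellStep land n m) (rest, vis)).2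
        (min miny now.2) (max maxy now.2) (cnt + 1)
      ∧ 5 * pvUnvis n m ((pvNbrs now).foldl (pvCellStep land n m) (rest, vis)).2
          + ((pvNbrs now).foldl (pvCellStep land n m) (rest, vis)).1.length + 1
        ≤ 5 * pvUnvis n m vis + (now :: rest).length := by
  have hre : pops ++ now :: rest = (pops ++ [now]) ++ rest := by simp
  have hnowR : pvReach land n m V s now :=
    (hInv.sound now (by simp)).1
  have hmid0 : pvMid land n m V s pops rest vis [] (rest, vis) now := by
    refine ⟨hInv.shape, ?_, ?_, ?_, fun c _ h => h, ?_, by simp, le_refl _⟩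
    · intro c hc
      rw [hInv.mem c hc]
      simp only [List.mem_append, List.mem_cons]
      tauto
    · rw [← hre]; exact hInv.nd
    · rw [← hre]; exact hInv.sound
    · rw [← hre]; exact hInv.seedmem
  have hmid := pvMid_fold land n m V s now pops rest vis hnowR (pvNbrs now)
    (fun d hd => hd) [] (rest, vis) hmid0
  obtain ⟨hsh, hmem, hnd, hsound, hmono, hseed, hdone, hmeas⟩ := hmid
  constructor
  · refine ⟨hsh, hmem, hnd, hsound, ?_, hseed, ?_, ?_, ?_⟩
    · intro c hc d hd hb hV
      rcases List.mem_append.mp hc with hc | hc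
      · exact hmono d hb.1 (hInv.frontier c hc d hd hb hV)
      · rcases List.mem_singleton.mp hc with rfl
        exact hdone d (by simpa using hd) hb hV
    · rw [hInv.cnt_eq]
      simp only [List.length_append, List.length_singleton]
      push_cast
      ring
    · rw [hInv.miny_eq]
      simp [List.map_append, List.foldl_append]
    · rw [hInv.maxy_eq]
      simp [List.map_append, List.foldl_append]
  · simp only [List.length_cons]
    omega

theorem pvBfsLoop_spec (land : List (List Int)) (n m : Int) (V : List (Int × Int))
    (s : Int × Int) :
    ∀ (fuel : Nat) (pops q : List (Int × Int)) (vis : List (List Bool)) (miny maxy cnt : Int),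
    pvInv land n m V s pops q vis miny maxy cnt →
    5 * pvUnvis n m vis + q.length < fuel →
    ∃ pops', pvInv land n m V s pops' []
      (pvBfsLoop land n m fuel q vis miny maxy cnt).1
      (pvBfsLoop land n m fuel q vis miny maxy cnt).2.1
      (pvBfsLoop land n m fuel q vis miny maxy cnt).2.2.1
      (pvBfsLoop land n m fuel q vis miny maxy cnt).2.2.2 := by
  intro fuel
  induction fuel with
  | zero => intro pops q vis miny maxy cnt _ hm; omega
  | succ fuel ih =>
    intro pops q vis miny maxy cnt hInv hm
    cases q with
    | nil => exact ⟨pops, by simpa [pvBfsLoop] using hInv⟩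
    | cons now rest =>
      obtain ⟨hInv', hmeas⟩ := pvStep_inv land n m V s now pops rest vis miny maxy cnt hInv
      have hred : pvBfsLoop land n m (fuel + 1) (now :: rest) vis miny maxy cnt
          = pvBfsLoop land n m fuel
              ((pvNbrs now).foldl (pvCellStep land n m) (rest, vis)).1
              ((pvNbrs now).foldl (pvCellStep land n m) (rest, vis)).2
              (min miny now.2) (max maxy now.2) (cnt + 1) := by
        rw [pvBfsLoop]
        rw [bfsDir_fold_eq]
      rw [hred]
      exact ih _ _ _ _ _ _ hInv' (by simp only [List.length_cons] at hmeas hm; omega)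

theorem pvInv_mem_final (land : List (List Int)) (n m : Int) (V : List (Int × Int))
    (s : Int × Int) (pops : List (Int × Int)) (vis : List (List Bool)) (miny maxy cnt : Int)
    (h : pvInv land n m V s pops [] vis miny maxy cnt) (c : Int × Int) :
    c ∈ pops ↔ pvReach land n m V s c := by
  constructor
  · intro hc; exact (h.sound c (by simpa using hc)).1
  · intro hr
    induction hr with
    | refl => simpa using h.seedmem
    | step hrc hn hb hv ih =>
      have hget := h.frontier _ ih _ hn hb hv
      have := (h.mem _ hb.1).mp hget
      simpa [hv] using this

-- ---------- transferring min/max/count between the two enumerations ----------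
theorem foldl_min_eq_of_mem (L M : List Int) (a b : Int)
    (hmm : ∀ y, y ∈ L ↔ y = b ∨ y ∈ M) (haL : a ∈ L) :
    L.foldl min a = M.foldl min b := by
  have hA := PySem.List.foldl_min_le L a
  have hB := PySem.List.foldl_min_le M b
  have hAin : L.foldl min a ∈ L := by
    rcases PySem.List.foldl_min_mem L a with h | h
    · rwa [h]
    · exact h
  have hBin : M.foldl min b ∈ L := by
    rcases PySem.List.foldl_min_mem M b with h | h
    · exact (hmm _).mpr (Or.inl h)
    · exact (hmm _).mpr (Or.inr h)
  apply le_antisymm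
  · exact hA.2 _ hBin
  · rcases (hmm _).mp hAin with h | h
    · rw [h]; exact hB.1
    · exact hB.2 _ h

theorem foldl_max_eq_of_mem (L M : List Int) (a b : Int)
    (hmm : ∀ y, y ∈ L ↔ y = b ∨ y ∈ M) (haL : a ∈ L) :
    L.foldl max a = M.foldl max b := by
  have hA := PySem.List.le_foldl_max L a
  have hB := PySem.List.le_foldl_max M b
  have hAin : L.foldl max a ∈ L := by
    rcases PySem.List.foldl_max_mem L a with h | h
    · rwa [h]
    · exact h
  have hBin : M.foldl max b ∈ L := by
    rcases PySem.List.foldl_max_mem M b with h | h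
    · exact (hmm _).mpr (Or.inl h)
    · exact (hmm _).mpr (Or.inr h)
  apply le_antisymm
  · rcases (hmm _).mp hAin with h | h
    · rw [h]; exact hB.1
    · exact hB.2 _ h
  · exact hA.2 _ hBin

-- ---------- the checked[] interval updates ----------
theorem pyGetD_pySetD_int (ch : List Int) (i c v : Int) (hi0 : 0 ≤ i)
    (hilen : i.toNat < ch.length) (hc0 : 0 ≤ c) :
    PySem.List.pyGetD (PySem.List.pySetD ch i v) c 0
      = if c = i then v else PySem.List.pyGetD ch c 0 := by
  rw [PySem.List.pySetD_of_nonneg _ _ hi0, PySem.List.pyGetD_of_nonneg _ _ hc0,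
    PySem.List.pyGetD_of_nonneg _ _ hc0, List.getD_eq_getElem?_getD, List.getD_eq_getElem?_getD]
  by_cases h : c = i
  · subst h
    rw [List.getElem?_set_self hilen, if_pos rfl, Option.getD_some]
  · have hne : c.toNat ≠ i.toNat := by omega
    rw [List.getElem?_set_ne (Ne.symm hne), if_neg h]

theorem length_chfold (v : Int) (L : List Int) : ∀ (ch : List Int),
    (L.foldl (fun ch c => PySem.List.pySetD ch c (PySem.List.pyGetD ch c 0 + v)) ch).length
      = ch.length := by
  induction L with
  | nil => intro ch; rfl
  | cons x t ih =>
    intro ch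
    rw [List.foldl_cons, ih, PySem.List.length_pySetD]

theorem checked_fold_get (m v : Int) : ∀ (k : Nat) (a b : Int), (b - a).toNat = k → 0 ≤ a →
    b ≤ m → ∀ (ch : List Int), ch.length = m.toNat → ∀ cc : Int, 0 ≤ cc → cc < m →
    PySem.List.pyGetD ((PySem.List.pyRange a b 1).foldl
        (fun ch c => PySem.List.pySetD ch c (PySem.List.pyGetD ch c 0 + v)) ch) cc 0
      = PySem.List.pyGetD ch cc 0 + (if a ≤ cc ∧ cc < b then v else 0) := by
  intro k
  induction k with
  | zero =>
    intro a b hk ha hb ch hch cc hcc0 hccm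
    rw [PySem.List.pyRange_one_eq_nil (by omega), List.foldl_nil, if_neg (by omega)]
    ring
  | succ k ih =>
    intro a b hk ha hb ch hch cc hcc0 hccm
    rw [PySem.List.pyRange_one_cons (by omega), List.foldl_cons]
    rw [ih (a + 1) b (by omega) (by omega) hb _ (by rw [PySem.List.length_pySetD]; exact hch)
      cc hcc0 hccm]
    rw [pyGetD_pySetD_int ch a cc _ ha (by omega) hcc0]
    by_cases hca : cc = a
    · subst hca
      rw [if_pos rfl, if_neg (show ¬(cc + 1 ≤ cc ∧ cc < b) by omega),
        if_pos (show cc ≤ cc ∧ cc < b by omega)]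
      ring
    · rw [if_neg hca]
      by_cases h1 : a + 1 ≤ cc ∧ cc < b
      · rw [if_pos h1, if_pos (by omega)]
      · rw [if_neg h1, if_neg (by omega)]

-- ---------- the outer scan: relating the two program states ----------
def pvRel (_land : List (List Int)) (n m : Int)
    (a : List (List Bool) × List Int)
    (b : List (Int × Int) × List (Int × Int × Int)) : Prop :=
  pvShape n m a.1 ∧
  (∀ c, pvInb n m c → (pvMget a.1 c = true ↔ c ∈ b.1)) ∧
  (∀ c ∈ b.1, pvInb n m c) ∧
  a.2.length = m.toNat ∧
  (∀ cc : Int, 0 ≤ cc → cc < m →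
     PySem.List.pyGetD a.2 cc 0 =
       b.2.foldl (fun acc t => if t.2.1 ≤ cc ∧ cc ≤ t.2.2 then acc + t.1 else acc) 0)

theorem foldl_rel {α β γ : Type} (R : α → β → Prop) (f : α → γ → α) (g : β → γ → β)
    (L : List γ) : ∀ (a0 : α) (b0 : β), R a0 b0 →
    (∀ (a : α) (b : β) (x : γ), x ∈ L → R a b → R (f a x) (g b x)) →
    R (L.foldl f a0) (L.foldl g b0) := by
  induction L with
  | nil => intro a0 b0 h0 _; exact h0
  | cons x t ih =>
    intro a0 b0 h0 hstep
    rw [List.foldl_cons, List.foldl_cons]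
    exact ih _ _ (hstep a0 b0 x List.mem_cons_self h0)
      (fun a b y hy => hstep a b y (List.mem_cons_of_mem _ hy))

-- ---------- one seed: BFS + interval update matches saturation + triple ----------

-- ---------- the break on fixpoint in B's saturation loop ----------
def pvSatF (land : List (List Int)) (n m : Int) (V : PySem.Set (Int × Int)) (s : Int × Int)
    (k : Nat) : PySem.Set (Int × Int) × Bool :=
  (List.range k).foldl
    (fun p _ =>
      if p.2 then p
      else
        let T := pvGrow land n m V p.1
        if PySem.Set.equal T p.1 then (p.1, true) else (T, false))
    (PySem.Set.ofList [s], false)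

theorem pvSatF_succ (land : List (List Int)) (n m : Int) (V : PySem.Set (Int × Int))
    (s : Int × Int) (k : Nat) :
    pvSatF land n m V s (k + 1)
      = (if (pvSatF land n m V s k).2 then pvSatF land n m V s k
         else
           let T := pvGrow land n m V (pvSatF land n m V s k).1
           if PySem.Set.equal T (pvSatF land n m V s k).1
           then ((pvSatF land n m V s k).1, true) else (T, false)) := by
  rw [pvSatF, pvSatF, List.range_succ, List.foldl_append, List.foldl_cons, List.foldl_nil]

theorem union_eq_of_equal (S : PySem.Set (Int × Int)) (T : List (Int × Int))
    (h : PySem.Set.equal (PySem.Set.union S T) S = true) : PySem.Set.union S T = S := by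
  have hm := (PySem.Set.equal_iff _ _).mp h
  have he : PySem.Set.union S T
      = S ++ (PySem.Set.ofList T).filter (fun y => !(PySem.Set.contains S y)) :=
    PySem.Set.update_eq_append_filter S T
  cases hf : (PySem.Set.ofList T).filter (fun y => !(PySem.Set.contains S y)) with
  | nil => rw [he, hf, List.append_nil]
  | cons e es =>
    exfalso
    have hemem : e ∈ (PySem.Set.ofList T).filter (fun y => !(PySem.Set.contains S y)) := by
      rw [hf]; exact List.mem_cons_self
    have hnotS : ¬ e ∈ S := by
      have h2 := (List.mem_filter.mp hemem).2
      intro hcon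
      rw [(PySem.Set.contains_iff S e).mpr hcon] at h2
      simp at h2
    have heU : e ∈ PySem.Set.union S T := by
      rw [he, hf]; exact List.mem_append_right _ List.mem_cons_self
    exact hnotS ((hm e).mp heU)

theorem pvGrow_eq_of_equal (land : List (List Int)) (n m : Int) (V : List (Int × Int))
    (S : PySem.Set (Int × Int)) (h : PySem.Set.equal (pvGrow land n m V S) S = true) :
    pvGrow land n m V S = S :=
  union_eq_of_equal S _ h

theorem mem_pvSat_closed (land : List (List Int)) (n m : Int) (V : PySem.Set (Int × Int))
    (s : Int × Int) (j : Nat)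
    (hfix : pvGrow land n m V (pvSat land n m V s j) = pvSat land n m V s j) :
    ∀ c, pvReach land n m V s c → c ∈ pvSat land n m V s j := by
  intro c hr
  induction hr with
  | refl => exact pvSat_le_mem land n m V s (Nat.zero_le j) (by rw [pvSat_zero]; simp)
  | step hrc hn hb hv ih =>
    rw [← hfix, mem_pvGrow]
    exact Or.inr ⟨_, ih, hn, hb, hv⟩

theorem pvSatF_spec (land : List (List Int)) (n m : Int) (V : PySem.Set (Int × Int))
    (s : Int × Int) : ∀ k : Nat, ∃ j : Nat, j ≤ k ∧
    (pvSatF land n m V s k).1 = pvSat land n m V s j ∧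
    ((pvSatF land n m V s k).2 = true →
      pvGrow land n m V (pvSat land n m V s j) = pvSat land n m V s j) ∧
    ((pvSatF land n m V s k).2 = false → j = k) := by
  intro k
  induction k with
  | zero =>
    exact ⟨0, le_refl _, rfl, fun h => by simp [pvSatF] at h, fun _ => rfl⟩
  | succ k ih =>
    obtain ⟨j, hj, h1, h2, h3⟩ := ih
    cases hfl : (pvSatF land n m V s k).2 with
    | true =>
      have hs1 : pvSatF land n m V s (k + 1) = pvSatF land n m V s k := by
        rw [pvSatF_succ, hfl]; simp
      exact ⟨j, by omega, by rw [hs1, h1], fun _ => h2 hfl,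
        fun hf => by rw [hs1, hfl] at hf; cases hf⟩
    | false =>
      have hjk : j = k := h3 hfl
      subst hjk
      cases heq : PySem.Set.equal (pvGrow land n m V (pvSatF land n m V s j).1)
          (pvSatF land n m V s j).1 with
      | true =>
        have hfix : pvGrow land n m V (pvSat land n m V s j) = pvSat land n m V s j := by
          rw [← h1]
          exact pvGrow_eq_of_equal land n m V _ heq
        have hs1 : pvSatF land n m V s (j + 1) = ((pvSatF land n m V s j).1, true) := by
          rw [pvSatF_succ, hfl]
          simp [heq]
        exact ⟨j, by omega, by rw [hs1]; exact h1, fun _ => hfix,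
          fun hf => by rw [hs1] at hf; cases hf⟩
      | false =>
        have hs1 : pvSatF land n m V s (j + 1)
            = (pvGrow land n m V (pvSatF land n m V s j).1, false) := by
          rw [pvSatF_succ, hfl]
          simp [heq]
        refine ⟨j + 1, le_refl _, ?_, ?_, fun _ => rfl⟩
        · rw [hs1]
          show pvGrow land n m V (pvSatF land n m V s j).1 = _
          rw [h1, ← pvSat_succ]
        · intro hf; rw [hs1] at hf; cases hf

theorem mem_pvSatF_final (land : List (List Int)) (n m : Int) (V : PySem.Set (Int × Int))
    {s : Int × Int} (hs : pvBlack land n m s) (c : Int × Int) :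
    c ∈ (pvSatF land n m V s (n.toNat * m.toNat)).1 ↔ pvReach land n m V s c := by
  obtain ⟨j, hj, h1, h2, h3⟩ := pvSatF_spec land n m V s (n.toNat * m.toNat)
  cases hfl : (pvSatF land n m V s (n.toNat * m.toNat)).2 with
  | true =>
    rw [h1]
    exact ⟨pvSat_sound land n m V s j c, mem_pvSat_closed land n m V s j (h2 hfl) c⟩
  | false =>
    rw [h1, h3 hfl]
    exact mem_pvSat_final land n m V hs c

theorem nodup_pvSatF (land : List (List Int)) (n m : Int) (V : PySem.Set (Int × Int))
    (s : Int × Int) (k : Nat) : ((pvSatF land n m V s k).1).Nodup := by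
  obtain ⟨j, _, h1, _, _⟩ := pvSatF_spec land n m V s k
  rw [h1]
  exact nodup_pvSat land n m V s j

set_option maxHeartbeats 2000000 in
theorem pvSeedStep (land : List (List Int)) (n m : Int) (i j : Int)
    (hi : 0 ≤ i) (hin : i < n) (hj : 0 ≤ j) (hjm : j < m)
    (a : List (List Bool) × List Int) (b : List (Int × Int) × List (Int × Int × Int))
    (hR : pvRel land n m a b) :
    pvRel land n m
      (if PySem.List.pyGetD (PySem.List.pyGetD a.1 i []) j false = false ∧
          PySem.List.pyGetD (PySem.List.pyGetD land i []) j 0 ≠ 0 then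
        let vis1 := PySem.List.pySetD a.1 i (PySem.List.pySetD (PySem.List.pyGetD a.1 i []) j true)
        let r := pvBfsLoop land n m (5 * (n.toNat * m.toNat) + 1) [(i, j)] vis1 j j 0
        let checked' := (PySem.List.pyRange r.2.1 (r.2.2.1 + 1) 1).foldl
          (fun ch c => PySem.List.pySetD ch c (PySem.List.pyGetD ch c 0 + r.2.2.2)) a.2
        (r.1, checked')
      else a)
      (if ¬ ((i, j) ∈ b.1) ∧ PySem.List.pyGetD (PySem.List.pyGetD land i []) j 0 ≠ 0 then
        let S := ((List.range (n.toNat * m.toNat)).foldl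
          (fun p _ =>
            if p.2 then p
            else
              let T := pvGrow land n m b.1 p.1
              if PySem.Set.equal T p.1 then (p.1, true) else (T, false))
          (PySem.Set.ofList [(i, j)], false)).1
        let ys := S.map (fun p => p.2)
        (PySem.Set.update b.1 S,
         b.2 ++ [((S.length : Int),
                  (PySem.List.min? ys (fun y => y)).getD 0,
                  (PySem.List.max? ys (fun y => y)).getD 0)])
      else b) := by
  obtain ⟨hsh, hmem, hbinb, hlen, hval⟩ := hR
  rw [show (PySem.List.pyGetD (PySem.List.pyGetD a.1 i []) j false)
      = pvMget a.1 (i, j) from rfl]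
  have hinb : pvInb n m (i, j) := ⟨hi, hin, hj, hjm⟩
  have hiffg : (pvMget a.1 (i, j) = false) ↔ ¬ ((i, j) ∈ b.1) := by
    have h1 := hmem (i, j) hinb
    constructor
    · intro hf hmem'
      exact absurd (h1.mpr hmem') (by simp [hf])
    · intro hn
      cases hcase : pvMget a.1 (i, j) with
      | false => rfl
      | true => exact absurd (h1.mp hcase) hn
  by_cases hvalij : PySem.List.pyGetD (PySem.List.pyGetD land i []) j 0 ≠ 0
  · by_cases hfree : pvMget a.1 (i, j) = false
    · rw [if_pos ⟨hfree, hvalij⟩, if_pos ⟨hiffg.mp hfree, hvalij⟩]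
      show pvRel land n m
        ((pvBfsLoop land n m (5 * (n.toNat * m.toNat) + 1) [(i, j)] (PySem.List.pySetD a.1 i (PySem.List.pySetD (PySem.List.pyGetD a.1 i []) j true)) j j 0).1,
         (PySem.List.pyRange (pvBfsLoop land n m (5 * (n.toNat * m.toNat) + 1) [(i, j)] (PySem.List.pySetD a.1 i (PySem.List.pySetD (PySem.List.pyGetD a.1 i []) j true)) j j 0).2.1 ((pvBfsLoop land n m (5 * (n.toNat * m.toNat) + 1) [(i, j)] (PySem.List.pySetD a.1 i (PySem.List.pySetD (PySem.List.pyGetD a.1 i []) j true)) j j 0).2.2.1 + 1) 1).foldl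
           (fun ch c => PySem.List.pySetD ch c (PySem.List.pyGetD ch c 0 + (pvBfsLoop land n m (5 * (n.toNat * m.toNat) + 1) [(i, j)] (PySem.List.pySetD a.1 i (PySem.List.pySetD (PySem.List.pyGetD a.1 i []) j true)) j j 0).2.2.2)) a.2)
        (PySem.Set.update b.1 (((List.range (n.toNat * m.toNat)).foldl (fun p _ => if p.2 then p else let T := pvGrow land n m b.1 p.1; if PySem.Set.equal T p.1 then (p.1, true) else (T, false)) (PySem.Set.ofList [(i, j)], false)).1),
         b.2 ++ [(((((List.range (n.toNat * m.toNat)).foldl (fun p _ => if p.2 then p else let T := pvGrow land n m b.1 p.1; if PySem.Set.equal T p.1 then (p.1, true) else (T, false)) (PySem.Set.ofList [(i, j)], false)).1).length : Int),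
                  (PySem.List.min? ((((List.range (n.toNat * m.toNat)).foldl (fun p _ => if p.2 then p else let T := pvGrow land n m b.1 p.1; if PySem.Set.equal T p.1 then (p.1, true) else (T, false)) (PySem.Set.ofList [(i, j)], false)).1).map (fun p => p.2)) (fun y => y)).getD 0,
                  (PySem.List.max? ((((List.range (n.toNat * m.toNat)).foldl (fun p _ => if p.2 then p else let T := pvGrow land n m b.1 p.1; if PySem.Set.equal T p.1 then (p.1, true) else (T, false)) (PySem.Set.ofList [(i, j)], false)).1).map (fun p => p.2)) (fun y => y)).getD 0)])
      have hs : pvBlack land n m (i, j) := ⟨hinb, hvalij⟩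
      have hsV : (i, j) ∉ b.1 := hiffg.mp hfree
      have hInv0 : pvInv land n m b.1 (i, j) [] [(i, j)]
          (PySem.List.pySetD a.1 i (PySem.List.pySetD (PySem.List.pyGetD a.1 i []) j true))
          j j 0 := by
        refine ⟨pvShape_mset hsh hinb, ?_, by simp, ?_, by simp, by simp, by simp, rfl, rfl⟩
        · intro c hc
          rw [show (PySem.List.pySetD a.1 i (PySem.List.pySetD (PySem.List.pyGetD a.1 i []) j true))
              = pvMset a.1 (i, j) from rfl]
          rw [pvMget_mset hsh hinb hc.1 hc.2.2.1]
          rcases eq_or_ne c (i, j) with rfl | hne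
          · simp
          · rw [if_neg hne, hmem c hc]
            simp [hne]
        · intro c hc
          simp only [List.nil_append, List.mem_singleton] at hc
          subst hc
          exact ⟨pvReach.refl, hsV⟩
      have hfuel : 5 * pvUnvis n m
          (PySem.List.pySetD a.1 i (PySem.List.pySetD (PySem.List.pyGetD a.1 i []) j true))
          + ([(i, j)] : List (Int × Int)).length < 5 * (n.toNat * m.toNat) + 1 := by
        have h1 : pvUnvis n m
            (PySem.List.pySetD a.1 i (PySem.List.pySetD (PySem.List.pyGetD a.1 i []) j true))
            < n.toNat * m.toNat := by
          refine pvUnvis_lt hinb ?_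
          exact pvMget_mset_self hsh hinb
        simp only [List.length_singleton]
        omega
      obtain ⟨pops', hfin⟩ := pvBfsLoop_spec land n m b.1 (i, j) (5 * (n.toNat * m.toNat) + 1)
        [] [(i, j)]
        (PySem.List.pySetD a.1 i (PySem.List.pySetD (PySem.List.pyGetD a.1 i []) j true))
        j j 0 hInv0 hfuel
      have hmemp : ∀ c, c ∈ pops' ↔ pvReach land n m b.1 (i, j) c :=
        pvInv_mem_final land n m b.1 (i, j) pops' _ _ _ _ hfin
      have hmemS : ∀ c, c ∈ (((List.range (n.toNat * m.toNat)).foldl (fun p _ => if p.2 then p else let T := pvGrow land n m b.1 p.1; if PySem.Set.equal T p.1 then (p.1, true) else (T, false)) (PySem.Set.ofList [(i, j)], false)).1)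
          ↔ pvReach land n m b.1 (i, j) c := fun c =>
        mem_pvSatF_final land n m b.1 hs c
      have hiffPS : ∀ c, c ∈ pops' ↔ c ∈ (((List.range (n.toNat * m.toNat)).foldl (fun p _ => if p.2 then p else let T := pvGrow land n m b.1 p.1; if PySem.Set.equal T p.1 then (p.1, true) else (T, false)) (PySem.Set.ofList [(i, j)], false)).1) :=
        fun c => (hmemp c).trans (hmemS c).symm
      have hndp : pops'.Nodup := by simpa using hfin.nd
      have hndS : ((((List.range (n.toNat * m.toNat)).foldl (fun p _ => if p.2 then p else let T := pvGrow land n m b.1 p.1; if PySem.Set.equal T p.1 then (p.1, true) else (T, false)) (PySem.Set.ofList [(i, j)], false)).1)).Nodup :=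
        nodup_pvSatF land n m b.1 (i, j) (n.toNat * m.toNat)
      have hlenPS : pops'.length = ((((List.range (n.toNat * m.toNat)).foldl (fun p _ => if p.2 then p else let T := pvGrow land n m b.1 p.1; if PySem.Set.equal T p.1 then (p.1, true) else (T, false)) (PySem.Set.ofList [(i, j)], false)).1)).length :=
        List.Perm.length_eq ((List.perm_ext_iff_of_nodup hndp hndS).mpr hiffPS)
      have hSne : (((List.range (n.toNat * m.toNat)).foldl (fun p _ => if p.2 then p else let T := pvGrow land n m b.1 p.1; if PySem.Set.equal T p.1 then (p.1, true) else (T, false)) (PySem.Set.ofList [(i, j)], false)).1) ≠ [] := by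
        intro hh
        have := (hmemS (i, j)).mpr pvReach.refl
        rw [hh] at this
        exact List.not_mem_nil this
      obtain ⟨y0, t, hSc⟩ := List.exists_cons_of_ne_nil hSne
      have hminmm : ∀ y, y ∈ pops'.map Prod.snd ↔ y = y0.2 ∨ y ∈ t.map (fun p => p.2) := by
        intro y
        simp only [List.mem_map]
        constructor
        · rintro ⟨p, hp, rfl⟩
          have := (hiffPS p).mp hp
          rw [hSc] at this
          rcases List.mem_cons.mp this with rfl | hpt
          · exact Or.inl rfl
          · exact Or.inr ⟨p, hpt, rfl⟩
        · rintro (rfl | ⟨p, hpt, rfl⟩)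
          · exact ⟨y0, (hiffPS y0).mpr (by rw [hSc]; exact List.mem_cons_self), rfl⟩
          · exact ⟨p, (hiffPS p).mpr (by rw [hSc]; exact List.mem_cons_of_mem _ hpt), rfl⟩
      have hseedp : (i, j) ∈ pops' := (hmemp _).mpr pvReach.refl
      have haL : (i, j).2 ∈ pops'.map Prod.snd := List.mem_map.mpr ⟨(i, j), hseedp, rfl⟩
      have hcolbound : ∀ y ∈ pops'.map Prod.snd, 0 ≤ y ∧ y < m := by
        intro y hy
        obtain ⟨p, hp, rfl⟩ := List.mem_map.mp hy
        have hb := pvReach_black hs ((hmemp p).mp hp)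
        exact ⟨hb.1.2.2.1, hb.1.2.2.2⟩
      have hysmin : (PySem.List.min? ((((List.range (n.toNat * m.toNat)).foldl (fun p _ => if p.2 then p else let T := pvGrow land n m b.1 p.1; if PySem.Set.equal T p.1 then (p.1, true) else (T, false)) (PySem.Set.ofList [(i, j)], false)).1).map (fun p => p.2))
            (fun y => y)).getD 0 = (t.map (fun p => p.2)).foldl min y0.2 := by
        rw [hSc, List.map_cons, PySem.List.min?_id_cons, Option.getD_some]
      have hysmax : (PySem.List.max? ((((List.range (n.toNat * m.toNat)).foldl (fun p _ => if p.2 then p else let T := pvGrow land n m b.1 p.1; if PySem.Set.equal T p.1 then (p.1, true) else (T, false)) (PySem.Set.ofList [(i, j)], false)).1).map (fun p => p.2))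
            (fun y => y)).getD 0 = (t.map (fun p => p.2)).foldl max y0.2 := by
        rw [hSc, List.map_cons, PySem.List.max?_id_cons, Option.getD_some]
      have hmineq : (pops'.map Prod.snd).foldl min (i, j).2
          = (t.map (fun p => p.2)).foldl min y0.2 :=
        foldl_min_eq_of_mem _ _ _ _ hminmm haL
      have hmaxeq : (pops'.map Prod.snd).foldl max (i, j).2
          = (t.map (fun p => p.2)).foldl max y0.2 :=
        foldl_max_eq_of_mem _ _ _ _ hminmm haL
      have hmin0 : 0 ≤ (pops'.map Prod.snd).foldl min (i, j).2 := by
        rcases PySem.List.foldl_min_mem (pops'.map Prod.snd) (i, j).2 with h | h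
        · rw [h]; exact hj
        · exact (hcolbound _ h).1
      have hmaxm : (pops'.map Prod.snd).foldl max (i, j).2 < m := by
        rcases PySem.List.foldl_max_mem (pops'.map Prod.snd) (i, j).2 with h | h
        · rw [h]; exact hjm
        · exact (hcolbound _ h).2
      refine ⟨hfin.shape, ?_, ?_, ?_, ?_⟩
      · intro c hc
        rw [hfin.mem c hc, PySem.Set.mem_update]
        rw [hiffPS c]
        simp
      · intro c hc
        rcases (PySem.Set.mem_update _ _ _).mp hc with hc | hc
        · exact hbinb c hc
        · exact (pvReach_black hs ((hmemS c).mp hc)).1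
      · rw [length_chfold]
        exact hlen
      · intro cc hcc0 hccm
        rw [checked_fold_get m _ ((((pvBfsLoop land n m (5 * (n.toNat * m.toNat) + 1) [(i, j)]
              (PySem.List.pySetD a.1 i (PySem.List.pySetD (PySem.List.pyGetD a.1 i []) j true))
              j j 0).2.2.1 + 1) - (pvBfsLoop land n m (5 * (n.toNat * m.toNat) + 1) [(i, j)]
              (PySem.List.pySetD a.1 i (PySem.List.pySetD (PySem.List.pyGetD a.1 i []) j true))
              j j 0).2.1).toNat) _ _ rfl (by rw [hfin.miny_eq]; exact hmin0)
          (by rw [hfin.maxy_eq]; omega) a.2 hlen cc hcc0 hccm]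
        rw [List.foldl_append, List.foldl_cons, List.foldl_nil]
        rw [← hval cc hcc0 hccm]
        rw [show ((((((List.range (n.toNat * m.toNat)).foldl (fun p _ => if p.2 then p else let T := pvGrow land n m b.1 p.1; if PySem.Set.equal T p.1 then (p.1, true) else (T, false)) (PySem.Set.ofList [(i, j)], false)).1).length : Int), (PySem.List.min? ((((List.range (n.toNat * m.toNat)).foldl (fun p _ => if p.2 then p else let T := pvGrow land n m b.1 p.1; if PySem.Set.equal T p.1 then (p.1, true) else (T, false)) (PySem.Set.ofList [(i, j)], false)).1).map (fun p => p.2)) (fun y => y)).getD 0, (PySem.List.max? ((((List.range (n.toNat * m.toNat)).foldl (fun p _ => if p.2 then p else let T := pvGrow land n m b.1 p.1; if PySem.Set.equal T p.1 then (p.1, true) else (T, false)) (PySem.Set.ofList [(i, j)], false)).1).map (fun p => p.2)) (fun y => y)).getD 0) : Int × Int × Int).2.1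
            = (PySem.List.min? ((((List.range (n.toNat * m.toNat)).foldl (fun p _ => if p.2 then p else let T := pvGrow land n m b.1 p.1; if PySem.Set.equal T p.1 then (p.1, true) else (T, false)) (PySem.Set.ofList [(i, j)], false)).1).map (fun p => p.2)) (fun y => y)).getD 0 from rfl]
        rw [show ((((((List.range (n.toNat * m.toNat)).foldl (fun p _ => if p.2 then p else let T := pvGrow land n m b.1 p.1; if PySem.Set.equal T p.1 then (p.1, true) else (T, false)) (PySem.Set.ofList [(i, j)], false)).1).length : Int), (PySem.List.min? ((((List.range (n.toNat * m.toNat)).foldl (fun p _ => if p.2 then p else let T := pvGrow land n m b.1 p.1; if PySem.Set.equal T p.1 then (p.1, true) else (T, false)) (PySem.Set.ofList [(i, j)], false)).1).map (fun p => p.2)) (fun y => y)).getD 0, (PySem.List.max? ((((List.range (n.toNat * m.toNat)).foldl (fun p _ => if p.2 then p else let T := pvGrow land n m b.1 p.1; if PySem.Set.equal T p.1 then (p.1, true) else (T, false)) (PySem.Set.ofList [(i, j)], false)).1).map (fun p => p.2)) (fun y => y)).getD 0) : Int × Int × Int).2.2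
            = (PySem.List.max? ((((List.range (n.toNat * m.toNat)).foldl (fun p _ => if p.2 then p else let T := pvGrow land n m b.1 p.1; if PySem.Set.equal T p.1 then (p.1, true) else (T, false)) (PySem.Set.ofList [(i, j)], false)).1).map (fun p => p.2)) (fun y => y)).getD 0 from rfl]
        rw [show ((((((List.range (n.toNat * m.toNat)).foldl (fun p _ => if p.2 then p else let T := pvGrow land n m b.1 p.1; if PySem.Set.equal T p.1 then (p.1, true) else (T, false)) (PySem.Set.ofList [(i, j)], false)).1).length : Int), (PySem.List.min? ((((List.range (n.toNat * m.toNat)).foldl (fun p _ => if p.2 then p else let T := pvGrow land n m b.1 p.1; if PySem.Set.equal T p.1 then (p.1, true) else (T, false)) (PySem.Set.ofList [(i, j)], false)).1).map (fun p => p.2)) (fun y => y)).getD 0, (PySem.List.max? ((((List.range (n.toNat * m.toNat)).foldl (fun p _ => if p.2 then p else let T := pvGrow land n m b.1 p.1; if PySem.Set.equal T p.1 then (p.1, true) else (T, false)) (PySem.Set.ofList [(i, j)], false)).1).map (fun p => p.2)) (fun y => y)).getD 0) : Int × Int × Int).1 = ((((List.range (n.toNat * m.toNat)).foldl (fun p _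 => if p.2 then p else let T := pvGrow land n m b.1 p.1; if PySem.Set.equal T p.1 then (p.1, true) else (T, false)) (PySem.Set.ofList [(i, j)], false)).1).length : Int) from rfl]
        rw [hysmin, hysmax, hfin.miny_eq, hfin.maxy_eq, hfin.cnt_eq, hmineq, hmaxeq, hlenPS]
        split_ifs <;> omega
    · have hA : ¬ (pvMget a.1 (i, j) = false ∧
          PySem.List.pyGetD (PySem.List.pyGetD land i []) j 0 ≠ 0) := fun hh => hfree hh.1
      have hB : ¬ (¬ ((i, j) ∈ b.1) ∧
          PySem.List.pyGetD (PySem.List.pyGetD land i []) j 0 ≠ 0) := fun hh =>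
        hfree (hiffg.mpr hh.1)
      rw [if_neg hA, if_neg hB]
      exact ⟨hsh, hmem, hbinb, hlen, hval⟩
  · rw [if_neg (fun hh => hvalij hh.2), if_neg (fun hh => hvalij hh.2)]
    exact ⟨hsh, hmem, hbinb, hlen, hval⟩
-- ===== VERDICT (by name: the statement is the Claim_ definition above) =====
set_option maxHeartbeats 1000000 in
theorem solution_spec : Claim_equal_solution := by
  intro land _ _
  show solution land = solution_alt land
  have hA : solution land =
      (PySem.List.max? ((PySem.List.pyRange 0 (land.length : Int) 1).foldl (fun st i =>
      (PySem.List.pyRange 0 ((PySem.List.pyGetD land 0 []).length : Int) 1).foldl (fun st j =>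
        if PySem.List.pyGetD (PySem.List.pyGetD st.1 i []) j false = false ∧
           PySem.List.pyGetD (PySem.List.pyGetD land i []) j 0 ≠ 0 then
          let vis1 := PySem.List.pySetD st.1 i (PySem.List.pySetD (PySem.List.pyGetD st.1 i []) j true)
          let r := pvBfsLoop land (land.length : Int) ((PySem.List.pyGetD land 0 []).length : Int) (5 * (((land.length : Int)).toNat * (((PySem.List.pyGetD land 0 []).length : Int)).toNat) + 1) [(i, j)] vis1 j j 0
          let checked' := (PySem.List.pyRange r.2.1 (r.2.2.1 + 1) 1).foldl
            (fun ch c => PySem.List.pySetD ch c (PySem.List.pyGetD ch c 0 + r.2.2.2)) st.2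
          (r.1, checked')
        else st) st) (List.replicate ((land.length : Int)).toNat (List.replicate (((PySem.List.pyGetD land 0 []).length : Int)).toNat false), List.replicate (((PySem.List.pyGetD land 0 []).length : Int)).toNat (0 : Int))).2 (fun x => x)).getD 0 := rfl
  have hB : solution_alt land =
      (PySem.List.max? ((PySem.List.pyRange 0 ((PySem.List.pyGetD land 0 []).length : Int) 1).map (fun c =>
        ((PySem.List.pyRange 0 (land.length : Int) 1).foldl (fun st i =>
      (PySem.List.pyRange 0 ((PySem.List.pyGetD land 0 []).length : Int) 1).foldl (fun st j =>
        if ¬ ((i, j) ∈ st.1) ∧ PySem.List.pyGetD (PySem.List.pyGetD land i []) j 0 ≠ 0 then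
          let S := ((List.range (((land.length : Int)).toNat * (((PySem.List.pyGetD land 0 []).length : Int)).toNat)).foldl
            (fun p _ =>
              if p.2 then p
              else
                let T := pvGrow land (land.length : Int) ((PySem.List.pyGetD land 0 []).length : Int) st.1 p.1
                if PySem.Set.equal T p.1 then (p.1, true) else (T, false))
            (PySem.Set.ofList [(i, j)], false)).1
          let ys := S.map (fun p => p.2)
          (PySem.Set.update st.1 S,
           st.2 ++ [((S.length : Int),
                     (PySem.List.min? ys (fun y => y)).getD 0,
                     (PySem.List.max? ys (fun y => y)).getD 0)])
        else st) st) ((PySem.Set.empty : PySem.Set (Int × Int)), ([] : List (Int × Int × Int)))).2.foldl (fun acc t => if t.2.1 ≤ c ∧ c ≤ t.2.2 then acc + t.1 else acc) 0))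
        (fun x => x)).getD 0 := rfl
  rw [hA, hB]
  have h0 : pvRel land (land.length : Int) ((PySem.List.pyGetD land 0 []).length : Int) (List.replicate ((land.length : Int)).toNat (List.replicate (((PySem.List.pyGetD land 0 []).length : Int)).toNat false), List.replicate (((PySem.List.pyGetD land 0 []).length : Int)).toNat (0 : Int)) ((PySem.Set.empty : PySem.Set (Int × Int)), ([] : List (Int × Int × Int))) := by
    refine ⟨⟨by simp, ?_⟩, ?_, ?_, by simp, ?_⟩
    · intro row hrow
      rw [List.eq_of_mem_replicate hrow]
      simp
    · intro c hc
      rw [pvMget_eq hc.1 hc.2.2.1]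
      simp only [List.getElem?_replicate]
      constructor
      · intro hcon
        split_ifs at hcon <;> simp_all
      · intro hcon
        exact absurd hcon (by simp [PySem.Set.empty])
    · intro c hc
      exact absurd hc (by simp [PySem.Set.empty])
    · intro cc hcc0 hccm
      rw [PySem.List.pyGetD_of_nonneg _ _ hcc0]
      simp only [List.getD_eq_getElem?_getD, List.getElem?_replicate, List.foldl_nil]
      split_ifs <;> rfl
  have hrel : pvRel land (land.length : Int) ((PySem.List.pyGetD land 0 []).length : Int) ((PySem.List.pyRange 0 (land.length : Int) 1).foldl (fun st i =>
      (PySem.List.pyRange 0 ((PySem.List.pyGetD land 0 []).length : Int) 1).foldl (fun st j =>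
        if PySem.List.pyGetD (PySem.List.pyGetD st.1 i []) j false = false ∧
           PySem.List.pyGetD (PySem.List.pyGetD land i []) j 0 ≠ 0 then
          let vis1 := PySem.List.pySetD st.1 i (PySem.List.pySetD (PySem.List.pyGetD st.1 i []) j true)
          let r := pvBfsLoop land (land.length : Int) ((PySem.List.pyGetD land 0 []).length : Int) (5 * (((land.length : Int)).toNat * (((PySem.List.pyGetD land 0 []).length : Int)).toNat) + 1) [(i, j)] vis1 j j 0
          let checked' := (PySem.List.pyRange r.2.1 (r.2.2.1 + 1) 1).foldl
            (fun ch c => PySem.List.pySetD ch c (PySem.List.pyGetD ch c 0 + r.2.2.2)) st.2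
          (r.1, checked')
        else st) st) (List.replicate ((land.length : Int)).toNat (List.replicate (((PySem.List.pyGetD land 0 []).length : Int)).toNat false), List.replicate (((PySem.List.pyGetD land 0 []).length : Int)).toNat (0 : Int))) ((PySem.List.pyRange 0 (land.length : Int) 1).foldl (fun st i =>
      (PySem.List.pyRange 0 ((PySem.List.pyGetD land 0 []).length : Int) 1).foldl (fun st j =>
        if ¬ ((i, j) ∈ st.1) ∧ PySem.List.pyGetD (PySem.List.pyGetD land i []) j 0 ≠ 0 then
          let S := ((List.range (((land.length : Int)).toNat * (((PySem.List.pyGetD land 0 []).length : Int)).toNat)).foldl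
            (fun p _ =>
              if p.2 then p
              else
                let T := pvGrow land (land.length : Int) ((PySem.List.pyGetD land 0 []).length : Int) st.1 p.1
                if PySem.Set.equal T p.1 then (p.1, true) else (T, false))
            (PySem.Set.ofList [(i, j)], false)).1
          let ys := S.map (fun p => p.2)
          (PySem.Set.update st.1 S,
           st.2 ++ [((S.length : Int),
                     (PySem.List.min? ys (fun y => y)).getD 0,
                     (PySem.List.max? ys (fun y => y)).getD 0)])
        else st) st) ((PySem.Set.empty : PySem.Set (Int × Int)), ([] : List (Int × Int × Int)))) := by
    refine foldl_rel (pvRel land (land.length : Int) ((PySem.List.pyGetD land 0 []).length : Int)) _ _ (PySem.List.pyRange 0 (land.length : Int) 1) _ _ h0 ?_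
    intro a b i hi hR
    have hib := PySem.List.mem_pyRange_one.mp hi
    refine foldl_rel (pvRel land (land.length : Int) ((PySem.List.pyGetD land 0 []).length : Int)) _ _ (PySem.List.pyRange 0 ((PySem.List.pyGetD land 0 []).length : Int) 1) a b hR ?_
    intro a' b' j hj hR'
    have hjb := PySem.List.mem_pyRange_one.mp hj
    exact pvSeedStep land (land.length : Int) ((PySem.List.pyGetD land 0 []).length : Int) i j hib.1 hib.2 hjb.1 hjb.2 a' b' hR'
  have hlist : ((PySem.List.pyRange 0 (land.length : Int) 1).foldl (fun st i =>
      (PySem.List.pyRange 0 ((PySem.List.pyGetD land 0 []).length : Int) 1).foldl (fun st j =>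
        if PySem.List.pyGetD (PySem.List.pyGetD st.1 i []) j false = false ∧
           PySem.List.pyGetD (PySem.List.pyGetD land i []) j 0 ≠ 0 then
          let vis1 := PySem.List.pySetD st.1 i (PySem.List.pySetD (PySem.List.pyGetD st.1 i []) j true)
          let r := pvBfsLoop land (land.length : Int) ((PySem.List.pyGetD land 0 []).length : Int) (5 * (((land.length : Int)).toNat * (((PySem.List.pyGetD land 0 []).length : Int)).toNat) + 1) [(i, j)] vis1 j j 0
          let checked' := (PySem.List.pyRange r.2.1 (r.2.2.1 + 1) 1).foldl
            (fun ch c => PySem.List.pySetD ch c (PySem.List.pyGetD ch c 0 + r.2.2.2)) st.2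
          (r.1, checked')
        else st) st) (List.replicate ((land.length : Int)).toNat (List.replicate (((PySem.List.pyGetD land 0 []).length : Int)).toNat false), List.replicate (((PySem.List.pyGetD land 0 []).length : Int)).toNat (0 : Int))).2
      = (PySem.List.pyRange 0 ((PySem.List.pyGetD land 0 []).length : Int) 1).map (fun c =>
          ((PySem.List.pyRange 0 (land.length : Int) 1).foldl (fun st i =>
      (PySem.List.pyRange 0 ((PySem.List.pyGetD land 0 []).length : Int) 1).foldl (fun st j =>
        if ¬ ((i, j) ∈ st.1) ∧ PySem.List.pyGetD (PySem.List.pyGetD land i []) j 0 ≠ 0 then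
          let S := ((List.range (((land.length : Int)).toNat * (((PySem.List.pyGetD land 0 []).length : Int)).toNat)).foldl
            (fun p _ =>
              if p.2 then p
              else
                let T := pvGrow land (land.length : Int) ((PySem.List.pyGetD land 0 []).length : Int) st.1 p.1
                if PySem.Set.equal T p.1 then (p.1, true) else (T, false))
            (PySem.Set.ofList [(i, j)], false)).1
          let ys := S.map (fun p => p.2)
          (PySem.Set.update st.1 S,
           st.2 ++ [((S.length : Int),
                     (PySem.List.min? ys (fun y => y)).getD 0,
                     (PySem.List.max? ys (fun y => y)).getD 0)])
        else st) st) ((PySem.Set.empty : PySem.Set (Int × Int)), ([] : List (Int × Int × Int)))).2.foldl (fun acc t => if t.2.1 ≤ c ∧ c ≤ t.2.2 then acc + t.1 else acc) 0) := by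
    apply List.ext_getElem
    · rw [hrel.2.2.2.1]
      simp [PySem.List.length_pyRange_one]
    · intro k h1 h2
      have hkM : (k : Int) < ((PySem.List.pyGetD land 0 []).length : Int) := by
        have hk' : k < (((PySem.List.pyGetD land 0 []).length : Int)).toNat := by
          rw [hrel.2.2.2.1] at h1
          exact h1
        omega
      rw [List.getElem_map, PySem.List.getElem_pyRange_one]
      simp only [zero_add]
      rw [← hrel.2.2.2.2 (k : Int) (by omega) hkM]
      rw [PySem.List.pyGetD_natCast, List.getD_eq_getElem?_getD, List.getElem?_eq_getElem h1,
        Option.getD_some]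
  rw [hlist]
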